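-- pv_equiv track=rewrite | github.com/GolubchikovKirill/gemup_marketplace | app/core/auth_bearer.py | _is_valid_token_format
-- ===== SOURCE A (Python) =====
-- def _is_valid_token_format(token: str) -> bool:
--     """Базовая проверка формата JWT токена."""
--     if not token or not isinstance(token, str):
--         return False
--
--     # JWT токен состоит из 3 частей, разделенных точками
--     parts = token.split(".")
--     if len(parts) != 3:
--         return False
--
--     # Каждая часть должна быть непустой
--     if not all(part.strip() for part in parts):
--         return False
--
--     return True
-- ===== SOURCE B (Python) =====
-- def _is_valid_token_format(token: str) -> bool:
--     """Single left-to-right scan: count dots, require a non-space char in every segment."""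
--     if not token or not isinstance(token, str):
--         return False
--     dots = 0
--     has = False
--     for ch in token:
--         if ch == '.':
--             if not has:
--                 return False
--             dots += 1
--             has = False
--         elif not ch.isspace():
--             has = True
--     return dots == 2 and has
-- ===== Notes on version B (the rewrite author's own statement) =====
-- stated objective: alternative
-- what changed: Replaces the split-into-parts plus strip-based all() scan with a single left-to-right character scan that counts separators and tracks whether the current segment contains a non-whitespace character, allocating no intermediate list.
import Mathlib
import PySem

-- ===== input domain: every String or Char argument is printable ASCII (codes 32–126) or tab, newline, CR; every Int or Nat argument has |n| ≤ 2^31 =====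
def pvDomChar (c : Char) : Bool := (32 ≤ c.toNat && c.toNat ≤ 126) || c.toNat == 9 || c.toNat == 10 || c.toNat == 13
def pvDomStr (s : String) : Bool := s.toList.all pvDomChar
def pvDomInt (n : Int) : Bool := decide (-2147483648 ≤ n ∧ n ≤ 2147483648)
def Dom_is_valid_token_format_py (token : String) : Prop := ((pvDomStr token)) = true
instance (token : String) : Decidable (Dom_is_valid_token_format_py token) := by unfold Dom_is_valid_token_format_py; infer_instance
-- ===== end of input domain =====

-- B replaces split('.')+strip/all with a single character scan (same O(n) cost, no parts list).
-- ===== PORT A =====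
def is_valid_token_format_py (token : String) : Bool :=
  -- if not token: return False   (isinstance is always true for a str)
  if token = "" then false
  else
    -- parts = token.split(".")
    let parts := PySem.Chars.splitOn token.toList ['.']
    -- if len(parts) != 3: return False
    if parts.length ≠ 3 then false
    -- if not all(part.strip() for part in parts): return False
    else if ¬ (parts.all fun p => (PySem.Chars.strip p).length ≠ 0) then false
    else true

-- ===== PORT B =====
-- the for-loop of Source B: state (dots, has); early `return False` on a dot after a blank segment
def altLoop : List Char → Nat → Bool → Bool
  | [], dots, has => dots == 2 && has
  | c :: rest, dots, has =>
    if c = '.' then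
      if !has then false else altLoop rest (dots + 1) false
    else if !(PySem.Chars.isspace c) then altLoop rest dots true
    else altLoop rest dots has

def is_valid_token_format_py_alt (token : String) : Bool :=
  if token = "" then false
  else altLoop token.toList 0 false

-- ===== PRECONDITION & SPEC =====
def Spec_is_valid_token_format_py (token : String) (out : Bool) : Prop := out = is_valid_token_format_py_alt token
instance (token : String) (out : Bool) : Decidable (Spec_is_valid_token_format_py token out) := by unfold Spec_is_valid_token_format_py; infer_instance

-- ===== CLAIM (what is proved, stated in full; the proofs are below) =====
def Claim_equal_is_valid_token_format_py : Prop := ∀ (token : String), Dom_is_valid_token_format_py token → Spec_is_valid_token_format_py token (is_valid_token_format_py token)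

-- ===== LEMMAS AND PROOFS =====

-- simple structural splitter on '.', to mediate between splitOn's fueled go and altLoop
def splitDot : List Char → List (List Char)
  | [] => [[]]
  | c :: rest =>
    if c = '.' then [] :: splitDot rest
    else
      match splitDot rest with
      | p :: ps => (c :: p) :: ps
      | [] => [[c]]

def nonspace (p : List Char) : Bool := p.any (fun c => !(PySem.Chars.isspace c))

theorem splitDot_ne_nil (cs : List Char) : splitDot cs ≠ [] := by
  cases cs with
  | nil => simp [splitDot]
  | cons c rest =>
    simp only [splitDot]
    split
    · simp
    · split <;> simp

theorem splitDot_cons' (cs : List Char) : ∃ p ps, splitDot cs = p :: ps := by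
  cases hsd : splitDot cs with
  | nil => exact absurd hsd (splitDot_ne_nil cs)
  | cons p ps => exact ⟨p, ps, rfl⟩

theorem go_spec (fuel : Nat) : ∀ (l cur : List Char) (acc : List (List Char)),
    l.length ≤ fuel →
    PySem.Chars.splitOn.go ['.'] fuel l cur acc =
      acc.reverse ++ ((cur.reverse ++ (splitDot l).headI) :: (splitDot l).tail) := by
  induction fuel with
  | zero =>
    intro l cur acc h
    have : l = [] := List.eq_nil_of_length_eq_zero (Nat.le_zero.mp h)
    subst this
    simp [PySem.Chars.splitOn.go, splitDot]
  | succ f ih =>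
    intro l cur acc h
    cases l with
    | nil => simp [PySem.Chars.splitOn.go, splitDot]
    | cons c rest =>
      rw [PySem.Chars.splitOn.go.eq_def]
      simp only []
      by_cases hc : c = '.'
      · subst hc
        have hpre : List.isPrefixOf ['.'] ('.' :: rest) = true := by
          simp [List.isPrefixOf]
        simp only [hpre, if_pos, List.length_cons, List.length_nil,
          List.drop_succ_cons, List.drop_zero]
        rw [ih rest [] (cur.reverse :: acc)
          (by simpa using Nat.lt_succ_iff.mp (by simpa using h))]
        obtain ⟨p, ps, hps⟩ := splitDot_cons' rest
        simp [splitDot, hps]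
      · have hpre : List.isPrefixOf ['.'] (c :: rest) = false := by
          simp only [List.isPrefixOf, List.isPrefixOf_nil_left, Bool.and_true, beq_iff_eq]
          exact decide_eq_false (fun hh => hc hh.symm)
        rw [if_neg (by simp [hpre])]
        rw [ih rest (c :: cur) acc
          (by simpa using Nat.lt_succ_iff.mp (by simpa using h))]
        obtain ⟨p, ps, hps⟩ := splitDot_cons' rest
        simp [splitDot, if_neg hc, hps]

theorem splitOn_eq_splitDot (cs : List Char) :
    PySem.Chars.splitOn cs ['.'] = splitDot cs := by
  unfold PySem.Chars.splitOn
  rw [go_spec (cs.length + 1) cs [] [] (Nat.le_succ _)]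
  obtain ⟨p, ps, hps⟩ := splitDot_cons' cs
  simp [hps]

theorem strip_eq_nil_iff (p : List Char) :
    PySem.Chars.strip p = [] ↔ ∀ x ∈ p, PySem.Chars.isspace x = true := by
  unfold PySem.Chars.strip PySem.Chars.rstrip PySem.Chars.lstrip
  simp only [List.reverse_eq_nil_iff, List.dropWhile_eq_nil_iff, List.mem_reverse]
  constructor
  · intro h x hx
    have hx' : x ∈ List.takeWhile PySem.Chars.isspace p ++
        List.dropWhile PySem.Chars.isspace p := by
      rw [List.takeWhile_append_dropWhile]; exact hx
    rcases List.mem_append.mp hx' with h1 | h2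
    · exact List.mem_takeWhile_imp h1
    · exact h x h2
  · intro h x hx
    exact h x ((List.dropWhile_sublist _).mem hx)

theorem strip_len_ne_zero (p : List Char) :
    ((PySem.Chars.strip p).length ≠ 0) ↔ nonspace p = true := by
  rw [Ne, List.length_eq_zero_iff, strip_eq_nil_iff]
  simp [nonspace]

theorem altLoop_spec (cs : List Char) : ∀ (dots : Nat) (has : Bool),
    altLoop cs dots has =
      (decide (dots + (splitDot cs).length = 3) &&
        ((has || nonspace (splitDot cs).headI) && (splitDot cs).tail.all nonspace)) := by
  induction cs with
  | nil =>
    intro dots has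
    simp only [altLoop, splitDot, List.length_cons, List.length_nil, List.headI, List.tail,
      List.all_nil, nonspace, List.any_nil, Bool.or_false, Bool.and_true]
    by_cases h : dots = 2
    · subst h; simp
    · simp [h, Nat.beq_eq_true_eq, show ¬ (dots + 1 = 3) by omega]
  | cons c rest ih =>
    intro dots has
    obtain ⟨p, ps, hps⟩ := splitDot_cons' rest
    simp only [altLoop]
    by_cases hc : c = '.'
    · subst hc
      have hsd : splitDot ('.' :: rest) = [] :: splitDot rest := by simp [splitDot]
      rw [if_pos rfl, hsd, hps]
      cases has with
      | false => simp [nonspace]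
      | true =>
        rw [if_neg (by simp), ih, hps]
        simp only [List.headI, List.tail_cons, List.all_cons, List.length_cons,
          Bool.false_or, Bool.true_or, Bool.true_and]
        have harith : (dots + 1 + (ps.length + 1) = 3) ↔
            (dots + (ps.length + 1 + 1) = 3) := by omega
        simp only [harith]
        rfl
    · rw [if_neg hc]
      have hsd : splitDot (c :: rest) = (c :: p) :: ps := by
        simp [splitDot, if_neg hc, hps]
      rw [hsd]
      by_cases hsp : PySem.Chars.isspace c = true
      · rw [if_neg (by simp [hsp]), ih, hps]
        simp only [List.headI, List.tail_cons, List.length_cons, nonspace,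
          List.any_cons, hsp, Bool.not_true, Bool.false_or]
        rfl
      · simp only [Bool.not_eq_true] at hsp
        rw [if_pos (by simp [hsp]), ih, hps]
        simp only [List.headI, List.tail_cons, List.length_cons, nonspace,
          List.any_cons, hsp, Bool.not_false, Bool.true_or, Bool.or_true, Bool.true_and]
        rfl

theorem strip_decide (p : List Char) :
    decide ((PySem.Chars.strip p).length ≠ 0) = nonspace p := by
  by_cases h : nonspace p = true
  · simp [h, (strip_len_ne_zero p).mpr h]
  · simp only [Bool.not_eq_true] at h
    have : ¬ ((PySem.Chars.strip p).length ≠ 0) := fun hh =>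
      by simp [(strip_len_ne_zero p).mp hh] at h
    simp [h, this]

-- ===== VERDICT (by name: the statement is the Claim_ definition above) =====
theorem is_valid_token_format_py_spec : Claim_equal_is_valid_token_format_py := by
  intro token _
  unfold Spec_is_valid_token_format_py
  unfold is_valid_token_format_py is_valid_token_format_py_alt
  by_cases he : token = ""
  · simp [he]
  · rw [if_neg he, if_neg he]
    rw [splitOn_eq_splitDot, altLoop_spec]
    obtain ⟨p, ps, hps⟩ := splitDot_cons' token.toList
    rw [hps]
    simp only [List.all_cons, strip_decide, List.headI, List.tail_cons, List.length_cons,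
      Bool.false_or, Nat.zero_add]
    by_cases hlen : ps.length + 1 = 3
    · rw [if_neg (by omega : ¬ (ps.length + 1 ≠ 3))]
      by_cases hall : (nonspace p && ps.all nonspace) = true
      · simp [hall, hlen]
      · simp only [Bool.not_eq_true] at hall
        simp [hall, hlen]
    · rw [if_pos (by omega)]
      simp [show ¬ (ps.length + 1 = 3) from hlen]
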